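-- pv_equiv track=rewrite | github.com/volcengine/verl | atropos/environments/intern_bootcamp/internbootcamp_lib/internbootcamp/bootcamp/bzuma/bzuma.py | _calculate_min_steps
-- ===== SOURCE A (Python) =====
-- def _calculate_min_steps(colors):
--     n = len(colors)
--     if n == 0:
--         return 0
--
--     dp = [[0]*n for _ in range(n)]
--     for i in range(n):
--         dp[i][i] = 1
--
--     for ln in range(1, n):
--         for i in range(n - ln):
--             j = i + ln
--             dp[i][j] = min(dp[i][k] + dp[k+1][j] for k in range(i, j))
--
--             if colors[i] == colors[j]:
--                 if ln == 1:
--                     dp[i][j] = 1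
--                 else:
--                     dp[i][j] = min(dp[i][j], dp[i+1][j-1])
--
--     return dp[0][n-1]
-- ===== SOURCE B (Python) =====
-- from functools import lru_cache
--
-- def _calculate_min_steps(colors):
--     n = len(colors)
--     if n == 0:
--         return 0
--
--     @lru_cache(maxsize=None)
--     def solve(i, j):
--         if j <= i:
--             return 1 if i == j else 0
--         best = min(solve(i, k) + solve(k + 1, j) for k in range(i, j))
--         if colors[i] == colors[j]:
--             best = 1 if j == i + 1 else min(best, solve(i + 1, j - 1))
--         return best
--
--     return solve(0, n - 1)
-- ===== Notes on version B (the rewrite author's own statement) =====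
-- stated objective: alternative
-- what changed: Replaced A's bottom-up 2D-table interval DP (filled by increasing interval length) with a top-down lru_cache-memoized recursion solve(i, j) over intervals, keeping A's exact recurrence including the length-1 equal-color case.
import Mathlib
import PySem

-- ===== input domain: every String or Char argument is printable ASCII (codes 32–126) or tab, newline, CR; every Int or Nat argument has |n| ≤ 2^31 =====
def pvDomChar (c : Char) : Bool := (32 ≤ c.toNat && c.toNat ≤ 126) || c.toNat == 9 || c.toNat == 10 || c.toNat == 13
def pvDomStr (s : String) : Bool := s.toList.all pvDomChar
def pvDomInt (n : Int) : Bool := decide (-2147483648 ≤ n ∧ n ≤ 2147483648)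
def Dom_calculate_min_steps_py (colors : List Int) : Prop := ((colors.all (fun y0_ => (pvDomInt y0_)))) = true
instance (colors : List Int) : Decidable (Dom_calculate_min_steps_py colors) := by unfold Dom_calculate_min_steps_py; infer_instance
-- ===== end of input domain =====

-- B replaces A's bottom-up 2D-table interval DP by a top-down memoized recursion over intervals (objective: alternative decomposition, same values).

-- ===== PORT A =====
-- bottom-up table; dp is a List of rows; all indexing is in range, so List.getD is exact
def calculate_min_steps_py (colors : List Int) : Int :=
  let n := colors.length
  if n = 0 then 0
  else
    let dp0 : List (List Int) := List.replicate n (List.replicate n (0 : Int))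
    let dp1 := (List.range n).foldl (fun dp i => dp.set i ((dp.getD i []).set i 1)) dp0
    let dp2 := (List.range' 1 (n - 1)).foldl (fun dp ln =>
      (List.range (n - ln)).foldl (fun dp i =>
        let j := i + ln
        let v := (PySem.List.min? ((List.range' i (j - i)).map
            (fun k => (dp.getD i []).getD k 0 + (dp.getD (k + 1) []).getD j 0)) (fun x => x)).getD 0
        let v := if colors.getD i 0 = colors.getD j 0 then
                   (if ln = 1 then 1 else min v ((dp.getD (i + 1) []).getD (j - 1) 0))
                 else v
        dp.set i ((dp.getD i []).set j v)) dp) dp1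
    (dp2.getD 0 []).getD (n - 1) 0

-- ===== PORT B =====
-- top-down recursion over the interval [i, j] (Source B memoizes with lru_cache; values identical)
def pvSolve (colors : List Int) (i j : Nat) : Int :=
  if j ≤ i then (if i = j then 1 else 0)
  else
    let best := (PySem.List.min? ((List.range' i (j - i)).attach.map
        (fun k => pvSolve colors i k.1 + pvSolve colors (k.1 + 1) j)) (fun x => x)).getD 0
    if colors.getD i 0 = colors.getD j 0 then
      (if j = i + 1 then 1 else min best (pvSolve colors (i + 1) (j - 1)))
    else best
termination_by j - i
decreasing_by
  · have := List.mem_range'_1.mp k.2; omega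
  · have := List.mem_range'_1.mp k.2; omega
  · omega

def calculate_min_steps_py_alt (colors : List Int) : Int :=
  if colors.length = 0 then 0 else pvSolve colors 0 (colors.length - 1)

-- ===== PRECONDITION & SPEC =====
def Spec_calculate_min_steps_py (colors : List Int) (out : Int) : Prop := out = calculate_min_steps_py_alt colors
instance (colors : List Int) (out : Int) : Decidable (Spec_calculate_min_steps_py colors out) := by unfold Spec_calculate_min_steps_py; infer_instance

-- ===== CLAIM (what is proved, stated in full; the proofs are below) =====
def Claim_equal_calculate_min_steps_py : Prop := ∀ (colors : List Int), Dom_calculate_min_steps_py colors → Spec_calculate_min_steps_py colors (calculate_min_steps_py colors)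

-- ===== LEMMAS AND PROOFS =====

-- table entry (i, j) of dp
def pvG (dp : List (List Int)) (i j : Nat) : Int := (dp.getD i []).getD j 0

-- the table is an n × n grid
def pvShape (dp : List (List Int)) (n : Nat) : Prop :=
  dp.length = n ∧ ∀ i, i < n → (dp.getD i []).length = n

theorem pv_row_set_self {dp : List (List Int)} {i : Nat} (r : List Int) (h : i < dp.length) :
    (dp.set i r).getD i [] = r := by
  simp [List.getD, h]

theorem pv_row_set_other {dp : List (List Int)} {i i' : Nat} (r : List Int) (h : i ≠ i') :
    (dp.set i r).getD i' [] = dp.getD i' [] := by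
  simp [List.getD, h]

theorem pv_cell_set_self {row : List Int} {j : Nat} (v : Int) (h : j < row.length) :
    (row.set j v).getD j 0 = v := by
  simp [List.getD, h]

theorem pv_cell_set_other {row : List Int} {j j' : Nat} (v : Int) (h : j ≠ j') :
    (row.set j v).getD j' 0 = row.getD j' 0 := by
  simp [List.getD, h]

theorem pvShape_set2 {dp : List (List Int)} {n i j : Nat} (v : Int)
    (h : pvShape dp n) (hi : i < n) :
    pvShape (dp.set i ((dp.getD i []).set j v)) n := by
  obtain ⟨h1, h2⟩ := h
  refine ⟨by simp [h1], ?_⟩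
  intro i' hi'
  by_cases hii : i = i'
  · subst hii
    rw [pv_row_set_self _ (h1 ▸ hi), List.length_set]
    exact h2 i hi
  · rw [pv_row_set_other _ hii]
    exact h2 i' hi'

theorem pvG_set2 {dp : List (List Int)} {n i j : Nat} (v : Int) (i' j' : Nat)
    (h : pvShape dp n) (hi : i < n) (hj : j < n) :
    pvG (dp.set i ((dp.getD i []).set j v)) i' j' =
      if i' = i ∧ j' = j then v else pvG dp i' j' := by
  obtain ⟨h1, h2⟩ := h
  unfold pvG
  by_cases hii : i = i'
  · subst hii
    rw [pv_row_set_self _ (h1 ▸ hi)]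
    by_cases hjj : j = j'
    · subst hjj
      rw [pv_cell_set_self _ ((h2 i hi) ▸ hj)]
      simp
    · rw [pv_cell_set_other _ hjj, if_neg (fun h => hjj h.2.symm)]
  · rw [pv_row_set_other _ hii, if_neg (fun h => hii h.1.symm)]

-- unfolding pvSolve on a nonempty interval, with the attach-map flattened
theorem pvSolve_eq {colors : List Int} {i j : Nat} (hij : i < j) :
    pvSolve colors i j =
      (if colors.getD i 0 = colors.getD j 0 then
         (if j = i + 1 then 1 else
           min ((PySem.List.min? ((List.range' i (j - i)).map
             (fun k => pvSolve colors i k + pvSolve colors (k + 1) j)) (fun x => x)).getD 0)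
             (pvSolve colors (i + 1) (j - 1)))
       else (PySem.List.min? ((List.range' i (j - i)).map
             (fun k => pvSolve colors i k + pvSolve colors (k + 1) j)) (fun x => x)).getD 0) := by
  rw [pvSolve]
  simp only [Nat.not_le.mpr hij, if_false]
  have hmap : List.map
      (fun k : {x // x ∈ List.range' i (j - i)} => pvSolve colors i k.1 + pvSolve colors (k.1 + 1) j)
      (List.range' i (j - i)).attach
      = List.map (fun k => pvSolve colors i k + pvSolve colors (k + 1) j) (List.range' i (j - i)) :=
    List.attach_map_val (f := fun k => pvSolve colors i k + pvSolve colors (k + 1) j)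
  rw [hmap]

theorem pvSolve_diag (colors : List Int) (i : Nat) : pvSolve colors i i = 1 := by
  rw [pvSolve]; simp

-- the value port A writes at cell (i, i + ln)  (the loop body's v, ln ≥ 1)
def pvVal (colors : List Int) (dp : List (List Int)) (ln i : Nat) : Int :=
  if colors.getD i 0 = colors.getD (i + ln) 0 then
    (if ln = 1 then 1 else
      min ((PySem.List.min? ((List.range' i (i + ln - i)).map
            (fun k => (dp.getD i []).getD k 0 + (dp.getD (k + 1) []).getD (i + ln) 0)) (fun x => x)).getD 0)
        ((dp.getD (i + 1) []).getD (i + ln - 1) 0))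
  else (PySem.List.min? ((List.range' i (i + ln - i)).map
            (fun k => (dp.getD i []).getD k 0 + (dp.getD (k + 1) []).getD (i + ln) 0)) (fun x => x)).getD 0

-- the loop body computes pvSolve at gap ln from a table correct on all gaps < ln
theorem pv_inner_step (colors : List Int) (n ln i : Nat) (dp : List (List Int))
    (h1 : 1 ≤ ln) (hi : i + ln < n)
    (hlow : ∀ a b, a < n → b < n → a ≤ b → b - a < ln → pvG dp a b = pvSolve colors a b) :
    pvVal colors dp ln i = pvSolve colors i (i + ln) := by
  have hlt : i < i + ln := by omega
  rw [pvSolve_eq hlt]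
  unfold pvVal
  have hmap : (List.range' i (i + ln - i)).map
      (fun k => (dp.getD i []).getD k 0 + (dp.getD (k + 1) []).getD (i + ln) 0)
      = (List.range' i (i + ln - i)).map
      (fun k => pvSolve colors i k + pvSolve colors (k + 1) (i + ln)) := by
    apply List.map_congr_left
    intro k hk
    have hk' := List.mem_range'_1.mp hk
    show pvG dp i k + pvG dp (k + 1) (i + ln) = _
    rw [hlow i k (by omega) (by omega) (by omega) (by omega),
        hlow (k + 1) (i + ln) (by omega) (by omega) (by omega) (by omega)]
  rw [hmap]
  by_cases hc : colors.getD i 0 = colors.getD (i + ln) 0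
  · rw [if_pos hc, if_pos hc]
    by_cases hln : ln = 1
    · rw [if_pos hln, if_pos (by omega : i + ln = i + 1)]
    · rw [if_neg hln, if_neg (by omega : ¬ i + ln = i + 1)]
      congr 1
      show pvG dp (i + 1) (i + ln - 1) = _
      exact hlow (i + 1) (i + ln - 1) (by omega) (by omega) (by omega) (by omega)
  · rw [if_neg hc, if_neg hc]

-- the diagonal-initialisation loop
theorem pv_diag_loop (n : Nat) : ∀ (cnt s : Nat) (dp : List (List Int)), s + cnt ≤ n →
    pvShape dp n → (∀ i, i < s → pvG dp i i = 1) →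
    pvShape ((List.range' s cnt).foldl (fun dp i => dp.set i ((dp.getD i []).set i 1)) dp) n ∧
    ∀ i, i < s + cnt →
      pvG ((List.range' s cnt).foldl (fun dp i => dp.set i ((dp.getD i []).set i 1)) dp) i i = 1 := by
  intro cnt
  induction cnt with
  | zero =>
    intro s dp _ hsh hprev
    exact ⟨hsh, fun i hi => hprev i (by omega)⟩
  | succ cnt ih =>
    intro s dp hb hsh hprev
    rw [List.range'_succ]
    simp only [List.foldl_cons]
    have hs : s < n := by omega
    have hsh' : pvShape (dp.set s ((dp.getD s []).set s 1)) n := pvShape_set2 1 hsh hs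
    have hprev' : ∀ i, i < s + 1 → pvG (dp.set s ((dp.getD s []).set s 1)) i i = 1 := by
      intro i hip
      rw [pvG_set2 1 i i hsh hs hs]
      by_cases h : i = s
      · rw [if_pos ⟨h, h⟩]
      · rw [if_neg (fun hh => h hh.1)]
        exact hprev i (by omega)
    have := ih (s + 1) (dp.set s ((dp.getD s []).set s 1)) (by omega) hsh' hprev'
    exact ⟨this.1, fun i hi => this.2 i (by omega)⟩

-- one pass of the inner loop (fixed gap ln)
theorem pv_inner_loop (colors : List Int) (n ln : Nat) (h1 : 1 ≤ ln) :
    ∀ (cnt s : Nat) (dp : List (List Int)), s + cnt ≤ n - ln →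
    pvShape dp n →
    (∀ a b, a < n → b < n → a ≤ b → b - a < ln → pvG dp a b = pvSolve colors a b) →
    (∀ i, i < s → pvG dp i (i + ln) = pvSolve colors i (i + ln)) →
    (let R := (List.range' s cnt).foldl (fun dp i =>
        dp.set i ((dp.getD i []).set (i + ln) (pvVal colors dp ln i))) dp
     pvShape R n ∧
     (∀ a b, a < n → b < n → a ≤ b → b - a < ln → pvG R a b = pvSolve colors a b) ∧
     (∀ i, i < s + cnt → pvG R i (i + ln) = pvSolve colors i (i + ln))) := by
  intro cnt
  induction cnt with
  | zero =>
    intro s dp _ hsh hlow hdone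
    exact ⟨hsh, hlow, fun i hi => hdone i (by omega)⟩
  | succ cnt ih =>
    intro s dp hb hsh hlow hdone
    rw [List.range'_succ]
    simp only [List.foldl_cons]
    have hs : s + ln < n := by omega
    have hsl : s < n := by omega
    have hval : pvVal colors dp ln s = pvSolve colors s (s + ln) :=
      pv_inner_step colors n ln s dp h1 hs hlow
    have hsh' : pvShape (dp.set s ((dp.getD s []).set (s + ln) (pvVal colors dp ln s))) n :=
      pvShape_set2 _ hsh hsl
    have hlow' : ∀ a b, a < n → b < n → a ≤ b → b - a < ln →
        pvG (dp.set s ((dp.getD s []).set (s + ln) (pvVal colors dp ln s))) a b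
          = pvSolve colors a b := by
      intro a b ha hbn hab hgap
      rw [pvG_set2 _ a b hsh hsl hs, if_neg (by omega : ¬ (a = s ∧ b = s + ln))]
      exact hlow a b ha hbn hab hgap
    have hdone' : ∀ i, i < s + 1 →
        pvG (dp.set s ((dp.getD s []).set (s + ln) (pvVal colors dp ln s))) i (i + ln)
          = pvSolve colors i (i + ln) := by
      intro i hip
      rw [pvG_set2 _ i (i + ln) hsh hsl hs]
      by_cases h : i = s
      · rw [if_pos (by omega : i = s ∧ i + ln = s + ln), h, hval]
      · rw [if_neg (by omega : ¬ (i = s ∧ i + ln = s + ln))]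
        exact hdone i (by omega)
    have := ih (s + 1) _ (by omega) hsh' hlow' hdone'
    exact ⟨this.1, this.2.1, fun i hi => this.2.2 i (by omega)⟩

-- the outer loop over gaps ln = s, s+1, …
theorem pv_outer_loop (colors : List Int) (n : Nat) :
    ∀ (cnt s : Nat) (dp : List (List Int)), 1 ≤ s →
    pvShape dp n →
    (∀ a b, a < n → b < n → a ≤ b → b - a < s → pvG dp a b = pvSolve colors a b) →
    (let R := (List.range' s cnt).foldl (fun dp ln =>
        (List.range (n - ln)).foldl (fun dp i =>
          dp.set i ((dp.getD i []).set (i + ln) (pvVal colors dp ln i))) dp) dp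
     pvShape R n ∧
     ∀ a b, a < n → b < n → a ≤ b → b - a < s + cnt → pvG R a b = pvSolve colors a b) := by
  intro cnt
  induction cnt with
  | zero =>
    intro s dp _ hsh hlow
    exact ⟨hsh, fun a b ha hb hab hg => hlow a b ha hb hab (by omega)⟩
  | succ cnt ih =>
    intro s dp hs1 hsh hlow
    rw [List.range'_succ]
    simp only [List.foldl_cons]
    have hin := pv_inner_loop colors n s hs1 (n - s) 0 dp (by omega) hsh hlow
      (by intro i hi; omega)
    rw [← List.range_eq_range'] at hin
    obtain ⟨hsh', hlow', hdone'⟩ := hin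
    have hnext : ∀ a b, a < n → b < n → a ≤ b → b - a < s + 1 →
        pvG ((List.range (n - s)).foldl (fun dp i =>
          dp.set i ((dp.getD i []).set (i + s) (pvVal colors dp s i))) dp) a b
          = pvSolve colors a b := by
      intro a b ha hb hab hg
      by_cases hgap : b - a < s
      · exact hlow' a b ha hb hab hgap
      · have hbeq : b = a + s := by omega
        subst hbeq
        exact hdone' a (by omega)
    have := ih (s + 1) _ (by omega) hsh' hnext
    exact ⟨this.1, fun a b ha hb hab hg => this.2 a b ha hb hab (by omega)⟩

theorem pvShape_init (n : Nat) : pvShape (List.replicate n (List.replicate n (0 : Int))) n := by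
  refine ⟨by simp, ?_⟩
  intro i hi
  rw [List.getD, List.getElem?_replicate, if_pos hi]
  simp

theorem pv_A_eq (colors : List Int) (h : ¬ colors.length = 0) :
    calculate_min_steps_py colors = pvSolve colors 0 (colors.length - 1) := by
  unfold calculate_min_steps_py
  show (if colors.length = 0 then (0 : Int) else _) = _
  rw [if_neg h]
  have hdiag := pv_diag_loop colors.length colors.length 0
    (List.replicate colors.length (List.replicate colors.length (0 : Int)))
    (by omega) (pvShape_init colors.length) (by intro i hi; omega)
  rw [← List.range_eq_range'] at hdiag
  have hlow1 : ∀ a b, a < colors.length → b < colors.length → a ≤ b → b - a < 1 →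
      pvG ((List.range colors.length).foldl (fun dp i => dp.set i ((dp.getD i []).set i 1))
        (List.replicate colors.length (List.replicate colors.length (0 : Int)))) a b
        = pvSolve colors a b := by
    intro a b ha hb hab hg
    have hba : b = a := by omega
    subst hba
    rw [pvSolve_diag]
    exact hdiag.2 _ (by omega)
  have hout := pv_outer_loop colors colors.length (colors.length - 1) 1 _
    (le_refl 1) hdiag.1 hlow1
  exact hout.2 0 (colors.length - 1) (by omega) (by omega) (by omega) (by omega)

-- ===== VERDICT (by name: the statement is the Claim_ definition above) =====
theorem calculate_min_steps_py_spec : Claim_equal_calculate_min_steps_py := by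
  intro colors _
  unfold Spec_calculate_min_steps_py calculate_min_steps_py_alt
  by_cases h : colors.length = 0
  · rw [if_pos h]
    unfold calculate_min_steps_py
    show (if colors.length = 0 then (0 : Int) else _) = _
    rw [if_pos h]
  · rw [if_neg h]
    exact pv_A_eq colors h
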